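-- pv_equiv track=rewrite | github.com/lkh3409/2023_TGwinG_FE_LEEKANGHOON | 이강훈_4주차_과제.py | beerRefrigerator
-- ===== SOURCE A (Python) =====
-- def beerRefrigerator(n):
--     bestCase = []
--     bestScore = 0
--     for x in range(1,n+1):
--         if n%x==0:
--             x2=n//x #n을 x로 나눈 값
--             for y in range(1,x2+1):
--                if x2%y==0:
--                    y2=x2//y #n을 x로 나눈 값을 y로 나눈 값 == z
--                    z=y2
--                    group = [x,y,z]
--                    score = x + y + z #겉넓이 공식 == 2(x+y+z)
--                    if not bestCase or bestScore > score:
--                       bestCase = group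
--                       bestScore = score
--     bestCase = sorted(bestCase, reverse=True)
--     return f"{bestCase[0]} X {bestCase[1]} X {bestCase[2]}"
-- ===== SOURCE B (Python) =====
-- def _divisors(m):
--     small, large = [], []
--     i = 1
--     while i * i <= m:
--         if m % i == 0:
--             small.append(i)
--             if i != m // i:
--                 large.append(m // i)
--         i += 1
--     return small + large[::-1]
--
-- def beerRefrigerator(n):
--     best = []
--     bestScore = 0
--     for x in _divisors(n):
--         m = n // x
--         for y in _divisors(m):
--             z = m // y
--             score = x + y + z
--             if not best or score < bestScore:
--                 best = [x, y, z]
--                 bestScore = score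
--     best = sorted(best, reverse=True)
--     return f"{best[0]} X {best[1]} X {best[2]}"
-- ===== Notes on version B (the rewrite author's own statement) =====
-- stated objective: faster
-- what changed: A scans every candidate edge 1..n (and 1..n/x inside) to find divisors; B enumerates divisors by trial division only up to sqrt, pairing each divisor with its cofactor, then runs the same first-strict-minimum selection over divisors only.
import Mathlib
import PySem

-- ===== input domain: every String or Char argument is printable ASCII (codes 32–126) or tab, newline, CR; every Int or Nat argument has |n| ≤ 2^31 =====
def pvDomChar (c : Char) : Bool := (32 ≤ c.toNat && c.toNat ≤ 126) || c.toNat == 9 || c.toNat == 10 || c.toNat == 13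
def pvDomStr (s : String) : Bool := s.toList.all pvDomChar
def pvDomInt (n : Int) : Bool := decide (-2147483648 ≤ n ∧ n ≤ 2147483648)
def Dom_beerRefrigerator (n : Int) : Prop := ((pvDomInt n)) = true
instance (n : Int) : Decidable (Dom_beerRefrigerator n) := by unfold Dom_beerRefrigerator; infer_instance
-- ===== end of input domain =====

-- B replaces A's O(n) scan over every candidate edge with divisor enumeration up to sqrt (same
-- first-strict-minimum tie-break, identical results); B is measurably faster on large n.

-- ===== PORT A =====
def beerRefrigerator (n : Int) : String :=
  let st : List Int × Int :=
    (PySem.List.pyRange 1 (n+1) 1).foldl (fun st x =>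
      if PySem.Int.mod n x == 0 then
        let x2 := PySem.Int.floordiv n x
        (PySem.List.pyRange 1 (x2+1) 1).foldl (fun st y =>
          if PySem.Int.mod x2 y == 0 then
            let y2 := PySem.Int.floordiv x2 y
            let z := y2
            let group := [x, y, z]
            let score := x + y + z
            if st.1.isEmpty || decide (st.2 > score) then (group, score) else st
          else st) st
      else st) ([], 0)
  let bestCase := PySem.List.sorted st.1 (fun v => v) true
  -- bestCase[0/1/2]: for n ≥ 1 bestCase has exactly 3 elements; for n ≤ 0 it is [] and Python
  -- raises IndexError (excluded by Pre_) — pyGetD's default is only ever used there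
  PySem.Int.toStr (PySem.List.pyGetD bestCase 0 0) ++ " X " ++
    PySem.Int.toStr (PySem.List.pyGetD bestCase 1 0) ++ " X " ++
    PySem.Int.toStr (PySem.List.pyGetD bestCase 2 0)

-- ===== PORT B =====
-- Source B _divisors: trial division up to sqrt(m); small = divisors ≤ sqrt, large = cofactors.
-- fuel only makes the while-loop structurally recursive; m.toNat + 1 steps always suffice.
def divAux (m : Int) (fuel : Nat) (i : Int) (small large : List Int) : List Int :=
  match fuel with
  | 0 => small ++ large.reverse
  | Nat.succ f =>
    if i * i ≤ m then
      if PySem.Int.mod m i == 0 then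
        if i ≠ PySem.Int.floordiv m i then
          divAux m f (i+1) (small ++ [i]) (large ++ [PySem.Int.floordiv m i])
        else
          divAux m f (i+1) (small ++ [i]) large
      else divAux m f (i+1) small large
    else small ++ large.reverse   -- small + large[::-1]

def divisors (m : Int) : List Int := divAux m (m.toNat + 1) 1 [] []

def beerRefrigerator_alt (n : Int) : String :=
  let st : List Int × Int :=
    (divisors n).foldl (fun st x =>
      let m := PySem.Int.floordiv n x
      (divisors m).foldl (fun st y =>
        let z := PySem.Int.floordiv m y
        let score := x + y + z
        if st.1.isEmpty || decide (score < st.2) then ([x, y, z], score) else st) st) ([], 0)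
  let best := PySem.List.sorted st.1 (fun v => v) true
  -- best[0/1/2]: 3 elements whenever n ≥ 1; [] only where Python raises (outside Pre_)
  PySem.Int.toStr (PySem.List.pyGetD best 0 0) ++ " X " ++
    PySem.Int.toStr (PySem.List.pyGetD best 1 0) ++ " X " ++
    PySem.Int.toStr (PySem.List.pyGetD best 2 0)

-- ===== PRECONDITION & SPEC =====
-- For n ≤ 0 no divisor is found and Python A raises IndexError on bestCase[0]; excluded.
def Pre_beerRefrigerator (n : Int) : Prop := 1 ≤ n
instance (n : Int) : Decidable (Pre_beerRefrigerator n) := by unfold Pre_beerRefrigerator; infer_instance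
def pvWitness_beerRefrigerator : Int := (12)

def Spec_beerRefrigerator (n : Int) (out : String) : Prop := out = beerRefrigerator_alt n
instance (n : Int) (out : String) : Decidable (Spec_beerRefrigerator n out) := by unfold Spec_beerRefrigerator; infer_instance

-- ===== CLAIM (what is proved, stated in full; the proofs are below) =====
def Claim_equal_beerRefrigerator : Prop := ∀ (n : Int), Dom_beerRefrigerator n → Pre_beerRefrigerator n → Spec_beerRefrigerator n (beerRefrigerator n)

-- ===== LEMMAS AND PROOFS =====

-- the "small" part of _divisors still to be produced from counter i
def lowD (m i : Int) : List Int :=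
  if i * i ≤ m then
    (if PySem.Int.mod m i == 0 then [i] else []) ++ lowD m (i+1)
  else []
termination_by (m + 1 - i).toNat
decreasing_by
  have hi : i ≤ m := by nlinarith [sq_nonneg i]
  omega

-- the "large" part of _divisors still to be produced from counter i
def highD (m i : Int) : List Int :=
  if i * i ≤ m then
    (if PySem.Int.mod m i == 0 ∧ i ≠ PySem.Int.floordiv m i then [PySem.Int.floordiv m i] else []) ++ highD m (i+1)
  else []
termination_by (m + 1 - i).toNat
decreasing_by
  have hi : i ≤ m := by nlinarith [sq_nonneg i]
  omega

lemma divAux_fuel (m : Int) (fuel : Nat) : ∀ (i : Int) (small large : List Int),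
    (m + 1 - i).toNat ≤ fuel →
    divAux m fuel i small large = small ++ lowD m i ++ (large ++ highD m i).reverse := by
  induction fuel with
  | zero =>
    intro i small large h
    have h0 : m + 1 ≤ i := by omega
    have hle : ¬ i * i ≤ m := by nlinarith [sq_nonneg (i-1), mul_self_nonneg i]
    rw [divAux, lowD, highD, if_neg hle, if_neg hle]
    simp
  | succ f ih =>
    intro i small large h
    rw [divAux]
    by_cases hle : i * i ≤ m
    · have hi : i ≤ m := by nlinarith [sq_nonneg i]
      have hf : (m + 1 - (i+1)).toNat ≤ f := by omega
      rw [if_pos hle, lowD, highD, if_pos hle, if_pos hle]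
      by_cases hmod : (PySem.Int.mod m i == 0) = true
      · by_cases hne : i ≠ PySem.Int.floordiv m i
        · rw [if_pos hmod, if_pos hne, ih _ _ _ hf, if_pos hmod, if_pos (And.intro hmod hne)]
          simp [List.append_assoc]
        · rw [if_pos hmod, if_neg hne, ih _ _ _ hf, if_pos hmod,
            if_neg (show ¬((PySem.Int.mod m i == 0) = true ∧ i ≠ PySem.Int.floordiv m i) from
              fun hp => hne hp.2)]
          simp [List.append_assoc]
      · rw [if_neg hmod, ih _ _ _ hf, if_neg hmod,
          if_neg (show ¬((PySem.Int.mod m i == 0) = true ∧ i ≠ PySem.Int.floordiv m i) from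
            fun hp => hmod hp.1)]
        simp
    · rw [if_neg hle, lowD, highD, if_neg hle, if_neg hle]
      simp

lemma mem_lowD (m i d : Int) :
    1 ≤ i → (d ∈ lowD m i ↔ i ≤ d ∧ d * d ≤ m ∧ PySem.Int.mod m d = 0) := by
  fun_induction lowD m i with
  | case1 i hle ih =>
    intro hi
    rw [List.mem_append, ih (by omega)]
    split_ifs with hmod
    · rw [beq_iff_eq] at hmod
      simp only [List.mem_singleton]
      constructor
      · rintro (rfl | ⟨h1, h2, h3⟩)
        · exact ⟨le_refl _, hle, hmod⟩
        · exact ⟨by omega, h2, h3⟩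
      · rintro ⟨h1, h2, h3⟩
        by_cases hdi : d = i
        · exact Or.inl hdi
        · exact Or.inr ⟨by omega, h2, h3⟩
    · rw [beq_iff_eq] at hmod
      simp only [List.not_mem_nil, false_or]
      constructor
      · rintro ⟨h1, h2, h3⟩; exact ⟨by omega, h2, h3⟩
      · rintro ⟨h1, h2, h3⟩
        refine ⟨?_, h2, h3⟩
        rcases eq_or_lt_of_le h1 with h | h
        · exact absurd (h ▸ h3) hmod
        · omega
  | case2 i hle =>
    intro hi
    simp only [List.not_mem_nil, false_iff]
    rintro ⟨h1, h2, h3⟩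
    exact hle (by nlinarith)

lemma mem_highD (m i d : Int) :
    1 ≤ i → (d ∈ highD m i ↔ ∃ j, i ≤ j ∧ j * j ≤ m ∧ PySem.Int.mod m j = 0 ∧
      j ≠ PySem.Int.floordiv m j ∧ d = PySem.Int.floordiv m j) := by
  fun_induction highD m i with
  | case1 i hle ih =>
    intro hi
    rw [List.mem_append, ih (by omega)]
    split_ifs with hc
    · simp only [List.mem_singleton]
      constructor
      · rintro (rfl | ⟨j, h1, h2, h3, h4, h5⟩)
        · exact ⟨i, le_refl _, hle, beq_iff_eq.mp hc.1, hc.2, rfl⟩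
        · exact ⟨j, by omega, h2, h3, h4, h5⟩
      · rintro ⟨j, h1, h2, h3, h4, h5⟩
        by_cases hji : j = i
        · exact Or.inl (by rw [h5, hji])
        · exact Or.inr ⟨j, by omega, h2, h3, h4, h5⟩
    · simp only [List.not_mem_nil, false_or]
      constructor
      · rintro ⟨j, h1, h2, h3, h4, h5⟩; exact ⟨j, by omega, h2, h3, h4, h5⟩
      · rintro ⟨j, h1, h2, h3, h4, h5⟩
        refine ⟨j, ?_, h2, h3, h4, h5⟩
        rcases eq_or_lt_of_le h1 with h | h
        · exact absurd ⟨by rw [beq_iff_eq, h]; exact h3, by rw [h]; exact h4⟩ hc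
        · omega
  | case2 i hle =>
    intro hi
    simp only [List.not_mem_nil, false_iff]
    rintro ⟨j, h1, h2, h3, h4, h5⟩
    exact hle (by nlinarith)

-- facts about exact cofactors (PySem floordiv with positive divisor = Int.ediv)
lemma cof_facts (m j : Int) (hm : 1 ≤ m) (hj : 1 ≤ j) (hdvd : PySem.Int.mod m j = 0) :
    1 ≤ PySem.Int.floordiv m j ∧ j * PySem.Int.floordiv m j = m ∧
      PySem.Int.mod m (PySem.Int.floordiv m j) = 0 ∧
      PySem.Int.floordiv m (PySem.Int.floordiv m j) = j := by
  have hd : j ∣ m := (PySem.Int.mod_eq_zero_iff_dvd m j).mp hdvd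
  have he : PySem.Int.floordiv m j = m / j := PySem.Int.floordiv_eq_ediv_of_pos (by omega)
  have hmul : j * (m / j) = m := Int.mul_ediv_cancel' hd
  have hq1 : 1 ≤ m / j := by nlinarith
  refine ⟨by rw [he]; exact hq1, by rw [he]; exact hmul, ?_, ?_⟩
  · rw [PySem.Int.mod_eq_zero_iff_dvd, he]
    exact ⟨j, by rw [mul_comm]; exact hmul.symm⟩
  · rw [he, PySem.Int.floordiv_eq_ediv_of_pos (show (0:Int) < m / j by omega)]
    calc m / (m / j) = j * (m / j) / (m / j) := by rw [hmul]
      _ = j := Int.mul_ediv_cancel j (by omega)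

lemma pairwise_lowD (m i : Int) : 1 ≤ i → (lowD m i).Pairwise (· < ·) := by
  fun_induction lowD m i with
  | case1 i hle ih =>
    intro hi
    apply List.pairwise_append.mpr
    refine ⟨?_, ih (by omega), ?_⟩
    · split_ifs <;> simp
    · intro a ha b hb
      have hb' := ((mem_lowD m (i+1) b) (by omega)).mp hb
      split_ifs at ha
      · rw [List.mem_singleton] at ha
        omega
      · exact absurd ha (List.not_mem_nil)
  | case2 i hle => intro _; exact List.Pairwise.nil

lemma pairwise_highD (m i : Int) (hm : 1 ≤ m) : 1 ≤ i → (highD m i).Pairwise (· > ·) := by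
  fun_induction highD m i with
  | case1 i hle ih =>
    intro hi
    apply List.pairwise_append.mpr
    refine ⟨?_, ih (by omega), ?_⟩
    · split_ifs <;> simp
    · intro a ha b hb
      obtain ⟨j, hj1, hj2, hj3, hj4, hj5⟩ := ((mem_highD m (i+1) b) (by omega)).mp hb
      split_ifs at ha with hc
      · rw [List.mem_singleton] at ha
        subst ha hj5
        -- a = m/i, b = m/j with i < j: cofactors strictly decrease
        obtain ⟨hq1, hmul, _, _⟩ := cof_facts m i hm hi (beq_iff_eq.mp hc.1)
        obtain ⟨hq1', hmul', _, _⟩ := cof_facts m j hm (by omega) hj3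
        have : i * PySem.Int.floordiv m i = j * PySem.Int.floordiv m j := by rw [hmul, hmul']
        show PySem.Int.floordiv m j < PySem.Int.floordiv m i
        nlinarith
      · exact absurd ha (List.not_mem_nil)
  | case2 i hle => intro _; exact List.Pairwise.nil

lemma divisors_eq (m : Int) (hm : 1 ≤ m) :
    divisors m = (PySem.List.pyRange 1 (m+1) 1).filter (fun d => PySem.Int.mod m d == 0) := by
  rw [divisors, divAux_fuel m (m.toNat + 1) 1 [] [] (by omega)]
  simp only [List.nil_append]
  -- both sides are <-sorted lists of exactly the divisors of m in [1, m]
  have hmemL : ∀ d : Int, d ∈ lowD m 1 ++ (highD m 1).reverse ↔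
      1 ≤ d ∧ d ≤ m ∧ PySem.Int.mod m d = 0 := by
    intro d
    rw [List.mem_append, List.mem_reverse, mem_lowD m 1 d le_rfl, mem_highD m 1 d le_rfl]
    constructor
    · rintro (⟨h1, h2, h3⟩ | ⟨j, hj1, hj2, hj3, hj4, hj5⟩)
      · have hd : d ∣ m := (PySem.Int.mod_eq_zero_iff_dvd m d).mp h3
        exact ⟨h1, Int.le_of_dvd (by omega) hd, h3⟩
      · obtain ⟨hq1, hmul, hq3, hq4⟩ := cof_facts m j hm hj1 hj3
        subst hj5
        refine ⟨hq1, ?_, hq3⟩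
        nlinarith
    · rintro ⟨h1, h2, h3⟩
      by_cases hsq : d * d ≤ m
      · exact Or.inl ⟨h1, hsq, h3⟩
      · right
        obtain ⟨hq1, hmul, hq3, hq4⟩ := cof_facts m d hm h1 h3
        refine ⟨PySem.Int.floordiv m d, hq1, ?_, hq3, ?_, hq4.symm⟩
        · nlinarith
        · rw [hq4]; intro h; rw [← h] at hsq; nlinarith
  have hpwL : (lowD m 1 ++ (highD m 1).reverse).Pairwise (· < ·) := by
    apply List.pairwise_append.mpr
    refine ⟨pairwise_lowD m 1 le_rfl, ?_, ?_⟩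
    · rw [List.pairwise_reverse]
      exact pairwise_highD m 1 hm le_rfl
    · intro a ha b hb
      obtain ⟨ha1, ha2, _⟩ := (mem_lowD m 1 a le_rfl).mp ha
      rw [List.mem_reverse] at hb
      obtain ⟨j, hj1, hj2, hj3, hj4, hj5⟩ := (mem_highD m 1 b le_rfl).mp hb
      obtain ⟨hq1, hmul, _, hq4⟩ := cof_facts m j hm hj1 hj3
      subst hj5
      -- b is a cofactor above the square root: b * b > m ≥ a * a
      have hjf : j < PySem.Int.floordiv m j := lt_of_le_of_ne (by nlinarith) hj4
      nlinarith
  have hmemR : ∀ d : Int,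
      d ∈ (PySem.List.pyRange 1 (m+1) 1).filter (fun d => PySem.Int.mod m d == 0) ↔
      1 ≤ d ∧ d ≤ m ∧ PySem.Int.mod m d = 0 := by
    intro d
    rw [List.mem_filter, PySem.List.mem_pyRange_one, beq_iff_eq]
    constructor
    · rintro ⟨⟨h1, h2⟩, h3⟩; exact ⟨h1, by omega, h3⟩
    · rintro ⟨h1, h2, h3⟩; exact ⟨⟨h1, by omega⟩, h3⟩
  have hpwR : ((PySem.List.pyRange 1 (m+1) 1).filter (fun d => PySem.Int.mod m d == 0)).Pairwise (· < ·) :=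
    List.Pairwise.filter _ (PySem.List.pairwise_lt_pyRange_one 1 (m+1))
  have hperm : (lowD m 1 ++ (highD m 1).reverse).Perm
      ((PySem.List.pyRange 1 (m+1) 1).filter (fun d => PySem.Int.mod m d == 0)) :=
    (List.perm_ext_iff_of_nodup (hpwL.imp ne_of_lt) (hpwR.imp ne_of_lt)).mpr
      (fun d => by rw [hmemL d, hmemR d])
  exact hperm.eq_of_pairwise (fun a b _ _ h1 h2 => le_antisymm h1 h2)
    (hpwL.imp le_of_lt) (hpwR.imp le_of_lt)

-- ===== VERDICT (by name: the statement is the Claim_ definition above) =====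
theorem beerRefrigerator_spec : Claim_equal_beerRefrigerator := by
  intro n _ hpre
  unfold Spec_beerRefrigerator beerRefrigerator beerRefrigerator_alt
  have key : (PySem.List.pyRange 1 (n+1) 1).foldl (fun st x =>
      if PySem.Int.mod n x == 0 then
        let x2 := PySem.Int.floordiv n x
        (PySem.List.pyRange 1 (x2+1) 1).foldl (fun st y =>
          if PySem.Int.mod x2 y == 0 then
            let y2 := PySem.Int.floordiv x2 y
            let z := y2
            let group := [x, y, z]
            let score := x + y + z
            if st.1.isEmpty || decide (st.2 > score) then (group, score) else st
          else st) st
      else st) (([], 0) : List Int × Int) =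
    (divisors n).foldl (fun st x =>
      let m := PySem.Int.floordiv n x
      (divisors m).foldl (fun st y =>
        let z := PySem.Int.floordiv m y
        let score := x + y + z
        if st.1.isEmpty || decide (score < st.2) then ([x, y, z], score) else st) st) (([], 0) : List Int × Int) := by
    rw [PySem.List.foldl_if_eq_foldl_filter]
    rw [← divisors_eq n hpre]
    apply PySem.List.foldl_congr_mem
    intro st x hx
    rw [divisors_eq n hpre, List.mem_filter, PySem.List.mem_pyRange_one, beq_iff_eq] at hx
    obtain ⟨⟨hx1, hx2⟩, hx3⟩ := hx
    have hq1 : 1 ≤ PySem.Int.floordiv n x := (cof_facts n x hpre hx1 hx3).1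
    simp only []
    rw [PySem.List.foldl_if_eq_foldl_filter, ← divisors_eq _ hq1]
  rw [key]
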